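-- pv_equiv track=rewrite | github.com/adverant/adverant-nexus-ee-design-partner | services/nexus-ee-design/python-scripts/agents/layout_optimizer/signal_flow_analyzer.py | _define_separation_zones
-- ===== SOURCE A (Python) =====
-- from collections import defaultdict, deque
-- from typing import Any, Dict, List, Optional, Set, Tuple
--
-- def _define_separation_zones(
--
--     component_info: Dict[str, Dict]
-- ) -> Dict[str, List[str]]:
--     """Define zones that should be spatially separated."""
--     zones = defaultdict(list)
--
--     for ref, info in component_info.items():
--         category = info.get('category', '')
--
--         # Analog zone
--         if 'ADC' in category or 'DAC' in category or category == 'Analog':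
--             zones['analog'].append(ref)
--
--         # Digital zone
--         elif category in ['MCU', 'IC', 'Gate_Driver']:
--             zones['digital'].append(ref)
--
--         # Power zone
--         elif category in ['Power', 'Regulator', 'LDO']:
--             zones['power'].append(ref)
--
--     return dict(zones)
-- ===== SOURCE B (Python) =====
-- def _zone(category):
--     """Pure classification of one category string into its zone (or None)."""
--     if 'ADC' in category or 'DAC' in category or category == 'Analog':
--         return 'analog'
--     if category in ('MCU', 'IC', 'Gate_Driver'):
--         return 'digital'
--     if category in ('Power', 'Regulator', 'LDO'):
--         return 'power'
--     return None
--
--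
-- def _define_separation_zones(component_info):
--     """Define zones that should be spatially separated."""
--     labeled = [(ref, _zone(info.get('category', '')))
--                for ref, info in component_info.items()]
--     order = []
--     for _, z in labeled:
--         if z is not None and z not in order:
--             order.append(z)
--     return {z: [ref for ref, zz in labeled if zz == z] for z in order}
-- ===== Notes on version B (the rewrite author's own statement) =====
-- stated objective: alternative
-- what changed: Replaced the single if/elif dispatch loop into a defaultdict with a classify-then-group pipeline: one pass labels each component with its zone via a pure helper, one pass dedups zone names in first-appearance order, and each zone's list is built by its own filter pass.
import Mathlib
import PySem

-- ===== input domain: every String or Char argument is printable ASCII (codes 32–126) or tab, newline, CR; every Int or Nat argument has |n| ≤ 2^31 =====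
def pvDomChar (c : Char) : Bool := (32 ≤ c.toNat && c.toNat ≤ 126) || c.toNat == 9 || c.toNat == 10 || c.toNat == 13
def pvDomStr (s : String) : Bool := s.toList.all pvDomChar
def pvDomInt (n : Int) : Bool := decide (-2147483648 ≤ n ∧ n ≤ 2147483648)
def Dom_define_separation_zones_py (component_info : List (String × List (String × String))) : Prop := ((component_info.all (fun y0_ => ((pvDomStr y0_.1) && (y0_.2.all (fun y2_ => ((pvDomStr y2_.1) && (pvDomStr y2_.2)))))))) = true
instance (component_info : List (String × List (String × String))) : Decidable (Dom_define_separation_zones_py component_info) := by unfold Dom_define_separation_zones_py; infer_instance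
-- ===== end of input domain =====

-- B replaces A's single if/elif dispatch loop into a defaultdict by a classify-then-group
-- pipeline (label each component with its zone, dedup zone names in first-appearance order,
-- build each zone's list with its own filter pass); objective: alternative decomposition.

-- info.get('category', '') on an association list (first match, per the dict convention)
def pvCat (info : List (String × String)) : String :=
  match info.find? (fun q => q.1 == "category") with
  | some q => q.2
  | none => ""

-- ===== PORT A =====
def define_separation_zones_py (component_info : List (String × List (String × String))) : List (String × List String) :=
  (component_info.foldl
    (fun (zones : PySem.Dict String (List String)) p =>
      let category := pvCat p.2
      if PySem.Str.isIn "ADC" category || PySem.Str.isIn "DAC" category || category == "Analog" then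
        zones.modify "analog" [] (fun l => l ++ [p.1])
      else if category == "MCU" || category == "IC" || category == "Gate_Driver" then
        zones.modify "digital" [] (fun l => l ++ [p.1])
      else if category == "Power" || category == "Regulator" || category == "LDO" then
        zones.modify "power" [] (fun l => l ++ [p.1])
      else zones)
    PySem.Dict.empty).items

-- ===== PORT B =====
def pvZone (category : String) : Option String :=
  if PySem.Str.isIn "ADC" category || PySem.Str.isIn "DAC" category || category == "Analog" then some "analog"
  else if category == "MCU" || category == "IC" || category == "Gate_Driver" then some "digital"
  else if category == "Power" || category == "Regulator" || category == "LDO" then some "power"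
  else none

def define_separation_zones_py_alt (component_info : List (String × List (String × String))) : List (String × List String) :=
  let labeled := component_info.map (fun p => (p.1, pvZone (pvCat p.2)))
  let order := labeled.foldl (fun acc q =>
    match q.2 with
    | some z => if z ∈ acc then acc else acc ++ [z]
    | none => acc) []
  order.map (fun z => (z, (labeled.filter (fun q => q.2 == some z)).map (fun q => q.1)))

-- ===== PRECONDITION & SPEC =====
def Spec_define_separation_zones_py (component_info : List (String × List (String × String))) (out : List (String × List String)) : Prop := out = define_separation_zones_py_alt component_info
instance (component_info : List (String × List (String × String))) (out : List (String × List String)) : Decidable (Spec_define_separation_zones_py component_info out) := by unfold Spec_define_separation_zones_py; infer_instance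

-- ===== CLAIM (what is proved, stated in full; the proofs are below) =====
def Claim_equal_define_separation_zones_py : Prop := ∀ (component_info : List (String × List (String × String))), Dom_define_separation_zones_py component_info → Spec_define_separation_zones_py component_info (define_separation_zones_py component_info)

-- ===== LEMMAS AND PROOFS =====

-- A's loop body, expressed on an already-labeled pair
def pvStepA (d : PySem.Dict String (List String)) (q : String × Option String) : PySem.Dict String (List String) :=
  match q.2 with
  | some z => d.modify z [] (fun l => l ++ [q.1])
  | none => d

-- B's order accumulator step
def pvOrdStep (acc : List String) (q : String × Option String) : List String :=
  match q.2 with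
  | some z => if z ∈ acc then acc else acc ++ [z]
  | none => acc

lemma pvStepA_eq (zones : PySem.Dict String (List String)) (p : String × List (String × String)) :
    (let category := pvCat p.2
      if PySem.Str.isIn "ADC" category || PySem.Str.isIn "DAC" category || category == "Analog" then
        zones.modify "analog" [] (fun l => l ++ [p.1])
      else if category == "MCU" || category == "IC" || category == "Gate_Driver" then
        zones.modify "digital" [] (fun l => l ++ [p.1])
      else if category == "Power" || category == "Regulator" || category == "LDO" then
        zones.modify "power" [] (fun l => l ++ [p.1])
      else zones)
    = pvStepA zones (p.1, pvZone (pvCat p.2)) := by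
  simp only [pvStepA, pvZone]
  split_ifs <;> rfl

lemma mem_pvOrdFold (L : List (String × Option String)) (acc : List String) (z : String) :
    z ∈ L.foldl pvOrdStep acc ↔ z ∈ acc ∨ some z ∈ L.map Prod.snd := by
  induction L generalizing acc with
  | nil => simp
  | cons q L ih =>
    simp only [List.foldl_cons, List.map_cons, List.mem_cons, ih, pvOrdStep]
    cases hq : q.2 with
    | none => simp
    | some w =>
      by_cases hw : w ∈ acc
      · simp only [hw, if_pos]
        constructor
        · tauto
        · rintro (h | h | h)
          · tauto
          · left; obtain rfl : z = w := by simpa using h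
            exact hw
          · tauto
      · simp only [hw, if_neg, not_false_iff, List.mem_append, List.mem_singleton]
        constructor
        · rintro (⟨h | h⟩ | h) <;> simp_all
        · rintro (h | h | h) <;> simp_all

lemma nodup_pvOrdFold (L : List (String × Option String)) (acc : List String) (h : acc.Nodup) :
    (L.foldl pvOrdStep acc).Nodup := by
  induction L generalizing acc with
  | nil => exact h
  | cons q L ih =>
    simp only [List.foldl_cons, pvOrdStep]
    cases q.2 with
    | none => exact ih acc h
    | some w =>
      by_cases hw : w ∈ acc
      · simp only [hw, if_pos]; exact ih acc h
      · simp only [hw, if_neg, not_false_iff]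
        exact ih _ (by simp [List.nodup_append, h]; intro a ha he; exact hw (he ▸ ha))

-- the grouped entries B builds from a labeled list
def pvEntries (L : List (String × Option String)) : List (String × List String) :=
  (L.foldl pvOrdStep []).map (fun z => (z, (L.filter (fun q => q.2 == some z)).map (fun q => q.1)))

lemma pvEntries_keys (L : List (String × Option String)) :
    (PySem.Dict.mk (pvEntries L)).keys = L.foldl pvOrdStep [] := by
  simp [pvEntries, PySem.Dict.keys_mk, List.map_map, Function.comp_def]

lemma pvMain (L : List (String × Option String)) :
    L.foldl pvStepA PySem.Dict.empty = PySem.Dict.mk (pvEntries L) := by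
  induction L using List.reverseRecOn with
  | nil => rfl
  | append_singleton L q ih =>
    rw [List.foldl_append, List.foldl_cons, List.foldl_nil, ih]
    cases hq : q.2 with
    | none =>
      simp only [pvStepA, hq]
      unfold pvEntries
      rw [List.foldl_append, List.foldl_cons, List.foldl_nil]
      simp [pvOrdStep, hq, List.filter_append]
    | some zn =>
      simp only [pvStepA, hq]
      have hkeys := pvEntries_keys L
      have hnd : (PySem.Dict.mk (pvEntries L)).keys.Nodup := by
        rw [hkeys]; exact nodup_pvOrdFold L [] (by simp)
      have hord : (L ++ [q]).foldl pvOrdStep [] =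
          if zn ∈ L.foldl pvOrdStep [] then L.foldl pvOrdStep []
          else L.foldl pvOrdStep [] ++ [zn] := by
        rw [List.foldl_append, List.foldl_cons, List.foldl_nil]
        simp [pvOrdStep, hq]
      by_cases hmem : zn ∈ L.foldl pvOrdStep []
      · -- zn already has an entry: modify updates it in place
        have hcont : (PySem.Dict.mk (pvEntries L)).contains zn = true := by
          rw [PySem.Dict.contains_eq_decide_mem_keys, hkeys]; simpa using hmem
        have hitem : (zn, (L.filter (fun q' => q'.2 == some zn)).map (fun q' => q'.1))
            ∈ (PySem.Dict.mk (pvEntries L)).items := by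
          show _ ∈ pvEntries L
          exact List.mem_map_of_mem hmem
        have hget := PySem.Dict.getD_of_mem_items _ hitem hnd ([] : List String)
        apply PySem.Dict.ext
        rw [PySem.Dict.modify, PySem.Dict.items_insert_of_contains _ _ hcont, hget]
        show (pvEntries L).map _ = pvEntries (L ++ [q])
        unfold pvEntries
        rw [hord, if_pos hmem, List.map_map]
        apply List.map_congr_left
        intro z _
        by_cases hz : z = zn
        · subst hz
          simp [List.filter_append, hq]
        · simp [Function.comp, List.filter_append, hq, Ne.symm hz,
            (by simpa using hz : (z == zn) = false)]
      · -- fresh zone: insert appends a new entry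
        have hcont : (PySem.Dict.mk (pvEntries L)).contains zn = false := by
          rw [PySem.Dict.contains_eq_decide_mem_keys, hkeys]; simpa using hmem
        have hempty : L.filter (fun q' => q'.2 == some zn) = [] := by
          rw [List.filter_eq_nil_iff]
          intro q' hq'
          have : some zn ∉ L.map Prod.snd := by
            intro hc
            exact hmem ((mem_pvOrdFold L [] zn).mpr (Or.inr hc))
          simp only [beq_iff_eq]
          intro he
          exact this (he ▸ List.mem_map_of_mem hq')
        apply PySem.Dict.ext
        rw [PySem.Dict.modify, PySem.Dict.items_insert_of_not_contains _ _ hcont,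
          PySem.Dict.getD_of_not_contains _ _ hcont]
        show pvEntries L ++ _ = pvEntries (L ++ [q])
        unfold pvEntries
        rw [hord, if_neg hmem, List.map_append]
        congr 1
        · apply List.map_congr_left
          intro z hz
          have hzne : z ≠ zn := fun he => hmem (he ▸ hz)
          simp [List.filter_append, hq,
            (by simpa using Ne.symm hzne : (zn == z) = false)]
        · simp [List.filter_append, hq, hempty]

-- ===== VERDICT (by name: the statement is the Claim_ definition above) =====
theorem define_separation_zones_py_spec : Claim_equal_define_separation_zones_py := by
  intro ci _
  unfold Spec_define_separation_zones_py define_separation_zones_py define_separation_zones_py_alt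
  have hfold : ci.foldl
      (fun (zones : PySem.Dict String (List String)) p =>
        let category := pvCat p.2
        if PySem.Str.isIn "ADC" category || PySem.Str.isIn "DAC" category || category == "Analog" then
          zones.modify "analog" [] (fun l => l ++ [p.1])
        else if category == "MCU" || category == "IC" || category == "Gate_Driver" then
          zones.modify "digital" [] (fun l => l ++ [p.1])
        else if category == "Power" || category == "Regulator" || category == "LDO" then
          zones.modify "power" [] (fun l => l ++ [p.1])
        else zones)
      PySem.Dict.empty
      = (ci.map (fun p => (p.1, pvZone (pvCat p.2)))).foldl pvStepA PySem.Dict.empty := by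
    rw [List.foldl_map]
    exact List.foldl_ext _ _ _ (fun d p _ => pvStepA_eq d p)
  rw [hfold, pvMain]
  rfl
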